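-- pv_equiv track=rewrite | github.com/AbdullahMadoun/JobAssistSkill | job_assist_skill/assistant/pipeline/cover_letter.py | extract_letter_components
-- ===== SOURCE A (Python) =====
-- from typing import Any, Dict, Optional
--
-- def extract_letter_components(cover_letter: str) -> Dict[str, str]:
--     """
--     Extract structured components from a cover letter.
--
--     Args:
--         cover_letter: The generated cover letter LaTeX content
--
--     Returns:
--         Dict with components:
--             - greeting: Opening salutation
--             - intro: Introduction paragraph
--             - body: Main paragraphs
--             - closing: Closing paragraph and sign-off
--     """
--     components = {
--         "greeting": "",
--         "intro": "",
--         "body": "",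
--         "closing": "",
--     }
--
--     if not cover_letter:
--         return components
--
--     # Simple extraction based on common patterns
--     lines = cover_letter.split("\n")
--
--     # Find greeting (Dear...)
--     for line in lines:
--         if line.strip().lower().startswith("dear"):
--             components["greeting"] = line.strip()
--             break
--
--     # Find closing (Sincerely, Best regards, etc.)
--     for line in reversed(lines):
--         if any(phrase in line.lower() for phrase in ["sincerely", "best regards", "respectfully"]):
--             # Get the closing paragraph
--             components["closing"] = line.strip()
--             break
--
--     return components
-- ===== SOURCE B (Python) =====
-- def extract_letter_components(cover_letter: str) -> dict:
--     """Single forward pass: first 'Dear' line wins for greeting, last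
--     closing-phrase line wins for closing."""
--     greeting = None
--     closing = None
--     for line in cover_letter.split("\n"):
--         stripped = line.strip()
--         low = line.lower()
--         if greeting is None and stripped.lower().startswith("dear"):
--             greeting = stripped
--         if "sincerely" in low or "best regards" in low or "respectfully" in low:
--             closing = stripped
--     return {
--         "greeting": greeting if greeting is not None else "",
--         "intro": "",
--         "body": "",
--         "closing": closing if closing is not None else "",
--     }
-- ===== Notes on version B (the rewrite author's own statement) =====
-- stated objective: simpler
-- what changed: Replaces A's two separate scans (forward break-on-first for greeting, reversed break-on-first for closing) and dict mutation by one forward fold over the lines keeping Optional greeting/closing state (first Dear wins, last closing phrase wins), plus dropping the special empty-string guard which the fold makes redundant.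
import Mathlib
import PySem

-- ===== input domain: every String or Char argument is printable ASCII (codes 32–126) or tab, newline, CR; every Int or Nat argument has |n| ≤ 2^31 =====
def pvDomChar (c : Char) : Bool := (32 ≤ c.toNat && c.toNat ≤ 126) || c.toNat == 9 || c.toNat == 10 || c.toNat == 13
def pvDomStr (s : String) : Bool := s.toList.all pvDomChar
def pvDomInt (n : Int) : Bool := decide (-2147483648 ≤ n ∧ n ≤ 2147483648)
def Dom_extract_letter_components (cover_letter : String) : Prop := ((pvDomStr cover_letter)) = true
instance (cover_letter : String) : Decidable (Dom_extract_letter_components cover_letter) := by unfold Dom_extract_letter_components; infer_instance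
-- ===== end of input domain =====

-- B replaces A's two scans (forward-first for greeting, reversed-first for closing) by one
-- forward fold keeping Option state; same return value (objective: simpler/alternative).

-- ===== PORT A =====
-- line.strip().lower().startswith("dear")
def elcDearCond (l : String) : Bool :=
  PySem.Str.startswith (PySem.Str.lower (PySem.Str.strip l)) "dear"

-- any(phrase in line.lower() for phrase in [...])
def elcCloseCond (l : String) : Bool :=
  PySem.Str.isIn "sincerely" (PySem.Str.lower l) ||
  PySem.Str.isIn "best regards" (PySem.Str.lower l) ||
  PySem.Str.isIn "respectfully" (PySem.Str.lower l)

-- for line in lines: if …dear…: components["greeting"] = line.strip(); break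
def elcGreetLoop : List String → PySem.Dict String String → PySem.Dict String String
  | [], d => d
  | l :: rest, d =>
    if elcDearCond l then d.insert "greeting" (PySem.Str.strip l)
    else elcGreetLoop rest d

-- for line in reversed(lines): if any(…): components["closing"] = line.strip(); break
def elcCloseLoop : List String → PySem.Dict String String → PySem.Dict String String
  | [], d => d
  | l :: rest, d =>
    if elcCloseCond l then d.insert "closing" (PySem.Str.strip l)
    else elcCloseLoop rest d

def extract_letter_components (cover_letter : String) : List (String × String) :=
  let components : PySem.Dict String String :=
    PySem.Dict.mk [("greeting", ""), ("intro", ""), ("body", ""), ("closing", "")]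
  if cover_letter = "" then components.items
  else
    let lines := (PySem.Str.split? cover_letter "\n").getD []
    let components := elcGreetLoop lines components
    let components := elcCloseLoop lines.reverse components
    components.items

-- ===== PORT B =====
-- one forward step: set greeting if still unset, overwrite closing on every match
def elcStep (s : Option String × Option String) (l : String) : Option String × Option String :=
  let stripped := PySem.Str.strip l
  let low := PySem.Str.lower l
  let g := match s.1 with
    | none => if PySem.Str.startswith (PySem.Str.lower stripped) "dear" then some stripped else none
    | some g0 => some g0
  let c := if PySem.Str.isIn "sincerely" low || PySem.Str.isIn "best regards" low ||
              PySem.Str.isIn "respectfully" low then some stripped else s.2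
  (g, c)

def extract_letter_components_alt (cover_letter : String) : List (String × String) :=
  let lines := (PySem.Str.split? cover_letter "\n").getD []
  let r := lines.foldl elcStep (none, none)
  [("greeting", r.1.getD ""), ("intro", ""), ("body", ""), ("closing", r.2.getD "")]

-- ===== PRECONDITION & SPEC =====
def Spec_extract_letter_components (cover_letter : String) (out : List (String × String)) : Prop := out = extract_letter_components_alt cover_letter
instance (cover_letter : String) (out : List (String × String)) : Decidable (Spec_extract_letter_components cover_letter out) := by unfold Spec_extract_letter_components; infer_instance

-- ===== CLAIM (what is proved, stated in full; the proofs are below) =====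
def Claim_equal_extract_letter_components : Prop := ∀ (cover_letter : String), Dom_extract_letter_components cover_letter → Spec_extract_letter_components cover_letter (extract_letter_components cover_letter)

-- ===== LEMMAS AND PROOFS =====

-- first line satisfying the greeting condition, stripped
def elcFirstG : List String → Option String
  | [] => none
  | l :: r => if elcDearCond l then some (PySem.Str.strip l) else elcFirstG r

-- first line satisfying the closing condition, stripped
def elcFirstC : List String → Option String
  | [] => none
  | l :: r => if elcCloseCond l then some (PySem.Str.strip l) else elcFirstC r

lemma elcFoldl_spec (lines : List String) (g c : Option String) :
    lines.foldl elcStep (g, c) =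
      ((g.orElse fun _ => elcFirstG lines),
       ((elcFirstC lines.reverse).orElse fun _ => c)) := by
  induction lines generalizing g c with
  | nil => simp [elcFirstG, elcFirstC]
  | cons l r ih =>
    simp only [List.foldl_cons, List.reverse_cons]
    have hstep : elcStep (g, c) l =
        ((g.orElse fun _ => if elcDearCond l then some (PySem.Str.strip l) else none),
         (if elcCloseCond l then some (PySem.Str.strip l) else c)) := by
      cases g <;> simp [elcStep, elcDearCond, elcCloseCond]
    rw [hstep, ih]
    simp only [Prod.mk.injEq]
    constructor
    · cases g <;> simp [elcFirstG]
      by_cases h : elcDearCond l <;> simp [h]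
    · -- elcFirstC (r.reverse ++ [l]) behaves as firstC r.reverse <|> (if cond then …)
      induction r.reverse with
      | nil => by_cases h : elcCloseCond l <;> simp [elcFirstC, h]
      | cons x xs ihx =>
        by_cases hx : elcCloseCond x
        · simp [elcFirstC, hx]
        · simpa [elcFirstC, hx] using ihx

lemma elcGreetLoop_spec (lines : List String) (d : PySem.Dict String String) :
    elcGreetLoop lines d =
      match elcFirstG lines with
      | none => d
      | some x => d.insert "greeting" x := by
  induction lines with
  | nil => simp [elcGreetLoop, elcFirstG]
  | cons l r ih =>
    by_cases h : elcDearCond l <;> simp [elcGreetLoop, elcFirstG, h, ih]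

lemma elcCloseLoop_spec (lines : List String) (d : PySem.Dict String String) :
    elcCloseLoop lines d =
      match elcFirstC lines with
      | none => d
      | some x => d.insert "closing" x := by
  induction lines with
  | nil => simp [elcCloseLoop, elcFirstC]
  | cons l r ih =>
    by_cases h : elcCloseCond l <;> simp [elcCloseLoop, elcFirstC, h, ih]

-- ===== VERDICT (by name: the statement is the Claim_ definition above) =====
theorem extract_letter_components_spec : Claim_equal_extract_letter_components := by
  intro cl _
  unfold Spec_extract_letter_components extract_letter_components extract_letter_components_alt
  by_cases hcl : cl = ""
  · subst hcl; decide
  · simp only [if_neg hcl]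
    rw [elcGreetLoop_spec, elcCloseLoop_spec, elcFoldl_spec]
    cases elcFirstG ((PySem.Str.split? cl "\n").getD []) <;>
      cases elcFirstC ((PySem.Str.split? cl "\n").getD []).reverse <;>
      simp [PySem.Dict.insert, PySem.Dict.contains, Option.orElse]
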